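-- pv_equiv track=rewrite | github.com/RifqiAnshariR/git-auto-commit | helper.py | diff_to_natural
-- ===== SOURCE A (Python) =====
-- def diff_to_natural(diff):
--     lines = diff.strip().split('\n')
--     changes = []
--     i = 0
--
--     while i < len(lines):
--         line = lines[i].strip()
--
--         # Modified line (one deletion followed by one addition)
--         if line.startswith('-') and i + 1 < len(lines) and lines[i + 1].strip().startswith('+'):
--             removed = lines[i][1:].strip()
--             added = lines[i + 1][1:].strip()
--             changes.append(f"Modified `{removed}` to `{added}`")
--             i += 2
--
--         # Added line
--         elif line.startswith('+'):
--             added = line[1:].strip()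
--             changes.append(f"Added `{added}`")
--             i += 1
--
--         # Removed line
--         elif line.startswith('-'):
--             removed = line[1:].strip()
--             changes.append(f"Removed `{removed}`")
--             i += 1
--
--         else:
--             i += 1
--
--     return "\n".join(changes)
-- ===== SOURCE B (Python) =====
-- def diff_to_natural(diff):
--     changes = []
--     pending = None  # raw text of an unmatched '-' line
--     for raw in diff.strip().split('\n'):
--         line = raw.strip()
--         if line.startswith('-'):
--             if pending is not None:
--                 changes.append(f"Removed `{pending.strip()[1:].strip()}`")
--             pending = raw
--         elif line.startswith('+'):
--             if pending is not None:
--                 changes.append(f"Modified `{pending[1:].strip()}` to `{raw[1:].strip()}`")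
--                 pending = None
--             else:
--                 changes.append(f"Added `{line[1:].strip()}`")
--         else:
--             if pending is not None:
--                 changes.append(f"Removed `{pending.strip()[1:].strip()}`")
--                 pending = None
--     if pending is not None:
--         changes.append(f"Removed `{pending.strip()[1:].strip()}`")
--     return "\n".join(changes)
-- ===== Notes on version B (the rewrite author's own statement) =====
-- stated objective: simpler
-- what changed: Replaced A's indexed while-loop with one-line lookahead and double stepping by a single forward fold that carries the raw text of the last unmatched removal line, flushing it as a Removed entry or pairing it into a Modified entry when an addition line follows.
import Mathlib
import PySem

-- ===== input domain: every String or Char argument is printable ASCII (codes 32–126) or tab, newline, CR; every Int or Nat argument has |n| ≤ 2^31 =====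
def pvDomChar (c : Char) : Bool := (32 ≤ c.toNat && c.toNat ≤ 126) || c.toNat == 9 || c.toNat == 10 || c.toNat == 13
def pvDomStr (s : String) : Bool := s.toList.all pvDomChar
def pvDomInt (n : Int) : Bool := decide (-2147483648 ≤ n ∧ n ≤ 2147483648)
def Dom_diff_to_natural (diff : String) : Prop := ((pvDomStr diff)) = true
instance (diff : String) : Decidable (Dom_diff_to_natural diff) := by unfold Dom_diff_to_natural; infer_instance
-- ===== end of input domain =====

-- B replaces A's indexed while-loop with one-line lookahead by a single forward pass
-- carrying a `pending` unmatched '-' line (objective: simpler decomposition; same cost).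

-- ===== PORT A =====
-- the '+'-/'-'-alone/other branches of A's loop body, applied to the current line
def pvAOne (cur : String) : List String :=
  let line := PySem.Str.strip cur
  if PySem.Str.startswith line "+" then
    ["Added `" ++ PySem.Str.strip (PySem.Str.slice line (some 1)) ++ "`"]
  else if PySem.Str.startswith line "-" then
    ["Removed `" ++ PySem.Str.strip (PySem.Str.slice line (some 1)) ++ "`"]
  else []

-- A's while-loop over the index i, as structural recursion on the suffix lines[i:]
-- (the Modified branch inspects lines[i+1] and advances i by 2)
def pvALoop : List String → List String
  | [] => []
  | [cur] => pvAOne cur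
  | cur :: nxt :: rest =>
    if PySem.Str.startswith (PySem.Str.strip cur) "-"
        ∧ PySem.Str.startswith (PySem.Str.strip nxt) "+" then
      ("Modified `" ++ PySem.Str.strip (PySem.Str.slice cur (some 1)) ++ "` to `"
        ++ PySem.Str.strip (PySem.Str.slice nxt (some 1)) ++ "`") :: pvALoop rest
    else
      pvAOne cur ++ pvALoop (nxt :: rest)

def diff_to_natural (diff : String) : String :=
  let lines := (PySem.Str.split? (PySem.Str.strip diff) "\n").getD []
  PySem.Str.join "\n" (pvALoop lines)

-- ===== PORT B =====
def pvRemovedMsg (raw : String) : String :=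
  "Removed `" ++ PySem.Str.strip (PySem.Str.slice (PySem.Str.strip raw) (some 1)) ++ "`"

-- one step of B's fold: state = (emitted messages so far, pending raw '-' line)
def pvBStep (st : List String × Option String) (raw : String) : List String × Option String :=
  let (changes, pending) := st
  let line := PySem.Str.strip raw
  if PySem.Str.startswith line "-" then
    (changes ++ (pending.map pvRemovedMsg).toList, some raw)
  else if PySem.Str.startswith line "+" then
    match pending with
    | some p =>
      (changes ++ ["Modified `" ++ PySem.Str.strip (PySem.Str.slice p (some 1)) ++ "` to `"
        ++ PySem.Str.strip (PySem.Str.slice raw (some 1)) ++ "`"], none)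
    | none =>
      (changes ++ ["Added `" ++ PySem.Str.strip (PySem.Str.slice line (some 1)) ++ "`"], none)
  else
    (changes ++ (pending.map pvRemovedMsg).toList, none)

def diff_to_natural_alt (diff : String) : String :=
  let st := ((PySem.Str.split? (PySem.Str.strip diff) "\n").getD []).foldl pvBStep ([], none)
  PySem.Str.join "\n" (st.1 ++ (st.2.map pvRemovedMsg).toList)

-- ===== PRECONDITION & SPEC =====
def Spec_diff_to_natural (diff : String) (out : String) : Prop := out = diff_to_natural_alt diff
instance (diff : String) (out : String) : Decidable (Spec_diff_to_natural diff out) := by unfold Spec_diff_to_natural; infer_instance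

-- ===== CLAIM (what is proved, stated in full; the proofs are below) =====
def Claim_equal_diff_to_natural : Prop := ∀ (diff : String), Dom_diff_to_natural diff → Spec_diff_to_natural diff (diff_to_natural diff)

-- ===== LEMMAS AND PROOFS =====

-- a string cannot start with both "-" and "+"
lemma pv_not_both (l : List Char) (h : PySem.Chars.startswith l ['-'] = true) :
    PySem.Chars.startswith l ['+'] = false := by
  rw [Bool.eq_false_iff]
  intro h2
  rw [PySem.Chars.startswith_iff] at h h2
  obtain ⟨t1, ht1⟩ := h
  obtain ⟨t2, ht2⟩ := h2
  rw [← ht1] at ht2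
  simp at ht2

lemma pvBStep_acc (acc : List String) (p : Option String) (r : String) :
    pvBStep (acc, p) r = (acc ++ (pvBStep ([], p) r).1, (pvBStep ([], p) r).2) := by
  cases p <;> simp only [pvBStep] <;> split_ifs <;> simp

-- B's fold in "emitted ++ rest" form
lemma pv_foldl_acc (ls : List String) (acc : List String) (p : Option String) :
    (ls.foldl pvBStep (acc, p)).1 = acc ++ (ls.foldl pvBStep ([], p)).1 ∧
    (ls.foldl pvBStep (acc, p)).2 = (ls.foldl pvBStep ([], p)).2 := by
  induction ls generalizing acc p with
  | nil => simp
  | cons r t ih =>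
    simp only [List.foldl_cons]
    rw [pvBStep_acc acc p r]
    obtain ⟨h1, h2⟩ := ih (acc ++ (pvBStep ([], p) r).1) (pvBStep ([], p) r).2
    obtain ⟨h3, h4⟩ := ih ((pvBStep ([], p) r).1) (pvBStep ([], p) r).2
    simp only [Prod.mk.eta] at h3 h4
    constructor
    · rw [h1, h3, List.append_assoc]
    · rw [h2, h4]

-- B's run from a state, fully flushed, as a pure list function
def pvBRun (ls : List String) (p : Option String) : List String :=
  let st := ls.foldl pvBStep ([], p)
  st.1 ++ (st.2.map pvRemovedMsg).toList

lemma pvBRun_cons (r : String) (t : List String) (p : Option String) :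
    pvBRun (r :: t) p = (pvBStep ([], p) r).1 ++ pvBRun t (pvBStep ([], p) r).2 := by
  unfold pvBRun
  simp only [List.foldl_cons]
  obtain ⟨h1, h2⟩ := pv_foldl_acc t (pvBStep ([], p) r).1 (pvBStep ([], p) r).2
  simp only [Prod.mk.eta] at h1 h2
  rw [h1, h2, List.append_assoc]

-- flushing a pending '-' line equals A's single-line Removed branch
lemma pv_base (raw : String)
    (hraw : PySem.Chars.startswith (PySem.Chars.strip raw.toList) ['-'] = true) :
    pvBRun [] (some raw) = pvALoop [raw] := by
  have h2 := pv_not_both _ hraw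
  simp [pvBRun, pvALoop, pvAOne, pvRemovedMsg, hraw, h2]

lemma pvALoop_cons_not_dash (r : String) (t : List String)
    (hd : PySem.Chars.startswith (PySem.Chars.strip r.toList) ['-'] = false) :
    pvALoop (r :: t) = pvAOne r ++ pvALoop t := by
  cases t with
  | nil => simp [pvALoop]
  | cons nxt rest => simp [pvALoop, hd]

-- main invariant: B with empty pending equals A's loop, and B with a pending '-'
-- line raw equals A's loop on raw :: ls
lemma pv_main : ∀ (n : Nat) (ls : List String), ls.length ≤ n →
    pvBRun ls none = pvALoop ls ∧
    (∀ raw, PySem.Chars.startswith (PySem.Chars.strip raw.toList) ['-'] = true →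
      pvBRun ls (some raw) = pvALoop (raw :: ls)) := by
  intro n
  induction n with
  | zero =>
    intro ls h
    have : ls = [] := List.eq_nil_of_length_eq_zero (Nat.le_zero.mp h)
    subst this
    exact ⟨rfl, fun raw hraw => pv_base raw hraw⟩
  | succ n ih =>
    intro ls h
    cases ls with
    | nil => exact ⟨rfl, fun raw hraw => pv_base raw hraw⟩
    | cons r t =>
      have ht : t.length ≤ n := by simpa using Nat.le_of_succ_le_succ (by simpa using h)
      have ih1 := (ih t ht).1
      have ih2 := (ih t ht).2
      constructor
      · rw [pvBRun_cons]
        by_cases hd : PySem.Chars.startswith (PySem.Chars.strip r.toList) ['-'] = true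
        · have e : pvBStep ([], none) r = ([], some r) := by simp [pvBStep, hd]
          rw [e]
          simpa using ih2 r hd
        · have hd' : PySem.Chars.startswith (PySem.Chars.strip r.toList) ['-'] = false := by
            simpa using hd
          by_cases hp : PySem.Chars.startswith (PySem.Chars.strip r.toList) ['+'] = true
          · have e : pvBStep ([], none) r
                = (["Added `" ++ PySem.Str.strip
                      (PySem.Str.slice (PySem.Str.strip r) (some 1)) ++ "`"], none) := by
              simp [pvBStep, hd', hp]
            rw [e, pvALoop_cons_not_dash r t hd']
            simp [ih1, pvAOne, hp]
          · have hp' : PySem.Chars.startswith (PySem.Chars.strip r.toList) ['+'] = false := by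
              simpa using hp
            have e : pvBStep ([], none) r = ([], none) := by simp [pvBStep, hd', hp']
            rw [e, pvALoop_cons_not_dash r t hd']
            simp [ih1, pvAOne, hd', hp']
      · intro raw hraw
        have hrawp := pv_not_both _ hraw
        rw [pvBRun_cons]
        by_cases hd : PySem.Chars.startswith (PySem.Chars.strip r.toList) ['-'] = true
        · have e : pvBStep ([], some raw) r = ([pvRemovedMsg raw], some r) := by
            simp [pvBStep, hd]
          rw [e]
          have hrp := pv_not_both _ hd
          have := ih2 r hd
          simp only [this]
          simp [pvALoop, hraw, hrp, hrawp, pvAOne, pvRemovedMsg]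
        · have hd' : PySem.Chars.startswith (PySem.Chars.strip r.toList) ['-'] = false := by
            simpa using hd
          by_cases hp : PySem.Chars.startswith (PySem.Chars.strip r.toList) ['+'] = true
          · have e : pvBStep ([], some raw) r
                = (["Modified `" ++ PySem.Str.strip (PySem.Str.slice raw (some 1)) ++ "` to `"
                    ++ PySem.Str.strip (PySem.Str.slice r (some 1)) ++ "`"], none) := by
              simp [pvBStep, hd', hp]
            rw [e]
            simp [ih1, pvALoop, hraw, hp]
          · have hp' : PySem.Chars.startswith (PySem.Chars.strip r.toList) ['+'] = false := by
              simpa using hp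
            have e : pvBStep ([], some raw) r = ([pvRemovedMsg raw], none) := by
              simp [pvBStep, hd', hp']
            rw [e]
            simp [ih1, pvALoop, hraw, hrawp, hd', hp', pvAOne, pvRemovedMsg,
              pvALoop_cons_not_dash r t hd']

-- ===== VERDICT (by name: the statement is the Claim_ definition above) =====
theorem diff_to_natural_spec : Claim_equal_diff_to_natural := by
  intro diff _
  unfold Spec_diff_to_natural diff_to_natural diff_to_natural_alt
  have h := (pv_main (((PySem.Str.split? (PySem.Str.strip diff) "\n").getD []).length) _ le_rfl).1
  unfold pvBRun at h
  simp only [] at h ⊢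
  rw [h]
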